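-- pv_equiv track=rewrite | github.com/Ohav/ex5 | ex5.py | count_words_per_direction
-- ===== SOURCE A (Python) =====
-- POSSIBLE_DIRECTIONS = {'horizontal': ['u', 'd'], 'vertical': ['l', 'r'],
--                        'dia_bot_left': ['z', 'w'], 'dia_top_left': ['x', 'y']
--                        }
--
-- def substr_occurrences(string, sub):
--     """
--     Returns the number of occurrences of a substr in a given string
--     """
--     count = start = 0
--     while True:
--         start = string.find(sub, start) + 1
--         if start > 0:
--             count += 1
--         else:
--             return count
--
-- def get_word_to_count(matrix, word_list, reverse=False):
--     """For each word in the list, searches it in the matrix and returns a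
--     word-count dictionary
--     """
--     word_to_count = {}
--     for word in word_list:
--         for row_string in matrix:
--             occurrences = 0
--             if reverse is True:
--                 occurrences += substr_occurrences(row_string, word[::-1])
--             else:
--                 occurrences += substr_occurrences(row_string, word)
--             if occurrences > 0:
--                 word_to_count[word] = word_to_count.get(word, 0) + occurrences
--     return word_to_count
--
-- def count_words_per_direction(matrix_list, word_list):
--     word_counts = []
--     for matrix in matrix_list:
--         for direction in matrix[1]:
--             if direction in POSSIBLE_DIRECTIONS['horizontal']:
--                 word_counts.append(get_word_to_count(
--                     matrix[0], word_list,
--                     direction == POSSIBLE_DIRECTIONS['horizontal'][0]))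
--             elif direction in POSSIBLE_DIRECTIONS['vertical']:
--                 word_counts.append(get_word_to_count(
--                     matrix[0], word_list,
--                     direction == POSSIBLE_DIRECTIONS['vertical'][0]))
--             elif direction in POSSIBLE_DIRECTIONS['dia_top_left']:
--                 word_counts.append(get_word_to_count(
--                     matrix[0], word_list,
--                     direction == POSSIBLE_DIRECTIONS['dia_top_left'][0]))
--             elif direction in POSSIBLE_DIRECTIONS['dia_bot_left']:
--                 word_counts.append(get_word_to_count(
--                     matrix[0], word_list,
--                     direction == POSSIBLE_DIRECTIONS['dia_bot_left'][0]))
--     return word_counts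
-- ===== SOURCE B (Python) =====
-- BACKWARD_DIRECTIONS = 'ulxz'
-- FORWARD_DIRECTIONS = 'drwy'
--
--
-- def _substring_counter(rows, lengths):
--     """One pass over each row's start positions: count every substring whose
--     length matches some word length.  Word lookups then cost O(1)."""
--     counts = {}
--     for row in rows:
--         n = len(row)
--         for i in range(n + 1):
--             for length in lengths:
--                 if i + length <= n:
--                     sub = row[i:i + length]
--                     counts[sub] = counts.get(sub, 0) + 1
--     return counts
--
--
-- def _direction_counts(counter, word_list, reverse):
--     counts = {}
--     for word in word_list:
--         occ = counter.get(word[::-1] if reverse else word, 0)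
--         if occ > 0:
--             counts[word] = counts.get(word, 0) + occ
--     return counts
--
--
-- def count_words_per_direction(matrix_list, word_list):
--     lengths = []
--     for word in word_list:
--         if len(word) not in lengths:
--             lengths.append(len(word))
--     result = []
--     for rows, directions in matrix_list:
--         counter = _substring_counter(rows, lengths)
--         for direction in directions:
--             if direction in BACKWARD_DIRECTIONS:
--                 result.append(_direction_counts(counter, word_list, True))
--             elif direction in FORWARD_DIRECTIONS:
--                 result.append(_direction_counts(counter, word_list, False))
--     return result
-- ===== Notes on version B (the rewrite author's own statement) =====
-- stated objective: alternative
-- what changed: B replaces A's per-word per-direction find-loop scans by a hash index built once per matrix: a counter of every substring whose length is one of the distinct word lengths, after which each direction's dictionary (forward or reversed words) is one O(1) counter lookup per word instead of a rescan of every row.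
import Mathlib
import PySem

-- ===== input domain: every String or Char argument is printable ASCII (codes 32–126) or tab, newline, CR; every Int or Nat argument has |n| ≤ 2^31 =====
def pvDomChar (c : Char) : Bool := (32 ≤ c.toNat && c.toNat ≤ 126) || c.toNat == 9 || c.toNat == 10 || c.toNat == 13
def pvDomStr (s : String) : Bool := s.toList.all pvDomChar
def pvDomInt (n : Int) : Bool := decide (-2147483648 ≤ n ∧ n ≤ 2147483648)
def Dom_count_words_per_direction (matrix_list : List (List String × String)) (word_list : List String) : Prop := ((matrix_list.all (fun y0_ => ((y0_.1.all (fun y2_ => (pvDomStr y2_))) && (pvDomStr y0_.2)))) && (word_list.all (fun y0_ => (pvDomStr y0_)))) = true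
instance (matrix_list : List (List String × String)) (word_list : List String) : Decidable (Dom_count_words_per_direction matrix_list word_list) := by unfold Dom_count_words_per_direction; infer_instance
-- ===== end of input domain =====

-- B re-implements the task by indexing each matrix ONCE: it builds a hash counter of every
-- substring whose length matches some word's length, so each direction's dictionary is then
-- produced by one O(1) counter lookup per word — A instead rescans every row with a str.find
-- loop for every word, again for every direction letter.  Objective: alternative.

-- ===== PORT A =====

-- Two facts about CPython's str.find(sub, start), used for termination of the find loop below.
-- CPython quirk (kept by PySem.Chars.findFrom): a start past len(s) yields -1 even for sub = ''.
theorem pv_findFrom_past (s sub : List Char) (k : Nat) (h : s.length < k) :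
    PySem.Chars.findFrom s sub (k : Int) = -1 := by
  have h0 : ¬((k : Int) < 0) := by exact_mod_cast Int.not_lt.mpr (Int.natCast_nonneg k)
  simp [PySem.Chars.findFrom, h0]
  intro h1
  exact absurd h1 (by exact_mod_cast Nat.not_le.mpr h)

theorem pv_findFrom_bounds (s sub : List Char) (k : Nat)
    (h : 0 < PySem.Chars.findFrom s sub (k : Int) + 1) :
    k ≤ (PySem.Chars.findFrom s sub (k : Int)).toNat ∧
      (PySem.Chars.findFrom s sub (k : Int)).toNat ≤ s.length := by
  by_cases hk : k ≤ s.length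
  · rw [PySem.Chars.findFrom_natCast s sub k hk] at h ⊢
    split_ifs at h ⊢ with hF
    · omega
    · have h1 := PySem.Chars.neg_one_le_find (List.drop k s) sub
      have h2 := PySem.Chars.find_le_length (List.drop k s) sub
      rw [List.length_drop] at h2
      omega
  · rw [pv_findFrom_past s sub k (by omega)] at h
    omega

-- while True: start = string.find(sub, start) + 1; if start > 0: count += 1 else: return count
def substrOccGo (s sub : List Char) (count : Int) (start : Nat) : Int :=
  let f := PySem.Chars.findFrom s sub (start : Int)
  if h : 0 < f + 1 then substrOccGo s sub (count + 1) (f + 1).toNat else count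
termination_by s.length + 1 - start
decreasing_by
  have hb := pv_findFrom_bounds s sub start h
  omega

def substr_occurrences (string sub : String) : Int :=
  substrOccGo string.toList sub.toList 0 0

-- module constant POSSIBLE_DIRECTIONS, per key (Python's 1-character strings are Chars here)
def POSSIBLE_DIRECTIONS_horizontal : List Char := ['u', 'd']
def POSSIBLE_DIRECTIONS_vertical : List Char := ['l', 'r']
def POSSIBLE_DIRECTIONS_dia_bot_left : List Char := ['z', 'w']
def POSSIBLE_DIRECTIONS_dia_top_left : List Char := ['x', 'y']

def get_word_to_count (matrix : List String) (word_list : List String) (reverse : Bool) :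
    PySem.Dict String Int :=
  word_list.foldl (fun word_to_count word =>
    matrix.foldl (fun word_to_count row_string =>
      let occurrences : Int :=
        if reverse = true then
          -- word[::-1]: slice with step -1 never fails, the getD default is never used
          0 + substr_occurrences row_string ((PySem.Str.slice? word none none (-1)).getD word)
        else
          0 + substr_occurrences row_string word
      if occurrences > 0 then
        word_to_count.insert word (word_to_count.getD word 0 + occurrences)
      else word_to_count) word_to_count) PySem.Dict.empty

def count_words_per_direction (matrix_list : List (List String × String)) (word_list : List String) : List (List (String × Int)) :=
  matrix_list.foldl (fun word_counts matrix =>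
    matrix.2.toList.foldl (fun word_counts direction =>
      if direction ∈ POSSIBLE_DIRECTIONS_horizontal then
        word_counts ++ [(get_word_to_count matrix.1 word_list (direction == 'u')).items]
      else if direction ∈ POSSIBLE_DIRECTIONS_vertical then
        word_counts ++ [(get_word_to_count matrix.1 word_list (direction == 'l')).items]
      else if direction ∈ POSSIBLE_DIRECTIONS_dia_top_left then
        word_counts ++ [(get_word_to_count matrix.1 word_list (direction == 'x')).items]
      else if direction ∈ POSSIBLE_DIRECTIONS_dia_bot_left then
        word_counts ++ [(get_word_to_count matrix.1 word_list (direction == 'z')).items]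
      else word_counts) word_counts) []

-- ===== PORT B =====

def BACKWARD_DIRECTIONS : String := "ulxz"
def FORWARD_DIRECTIONS : String := "drwy"

-- counts[row[i:i+L]] += 1 for every start i and every word length L fitting at i
def alt_substring_counter (rows : List String) (lengths : List Nat) : PySem.Dict (List Char) Int :=
  rows.foldl (fun counts row =>
    (List.range (row.toList.length + 1)).foldl (fun counts i =>
      lengths.foldl (fun counts L =>
        if i + L ≤ row.toList.length then
          counts.insert ((row.toList.drop i).take L)
            ((counts.getD ((row.toList.drop i).take L) 0) + 1)
        else counts) counts) counts) PySem.Dict.empty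

-- occ = counter.get(word[::-1] if reverse else word, 0); if occ > 0: counts[word] += occ
def alt_direction_counts (counter : PySem.Dict (List Char) Int) (word_list : List String)
    (reverse : Bool) : PySem.Dict String Int :=
  word_list.foldl (fun counts word =>
    let occ := counter.getD (if reverse then word.toList.reverse else word.toList) 0
    if occ > 0 then counts.insert word (counts.getD word 0 + occ) else counts)
    PySem.Dict.empty

def count_words_per_direction_alt (matrix_list : List (List String × String)) (word_list : List String) : List (List (String × Int)) :=
  -- lengths: the distinct word lengths, first occurrences in order
  let lengths : PySem.Set Nat :=
    word_list.foldl (fun s word => PySem.Set.add s word.toList.length) PySem.Set.empty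
  matrix_list.foldl (fun result m =>
    let counter := alt_substring_counter m.1 lengths
    m.2.toList.foldl (fun result direction =>
      if direction ∈ BACKWARD_DIRECTIONS.toList then
        result ++ [(alt_direction_counts counter word_list true).items]
      else if direction ∈ FORWARD_DIRECTIONS.toList then
        result ++ [(alt_direction_counts counter word_list false).items]
      else result) result) []

-- ===== PRECONDITION & SPEC =====
def Spec_count_words_per_direction (matrix_list : List (List String × String)) (word_list : List String) (out : List (List (String × Int))) : Prop := out = count_words_per_direction_alt matrix_list word_list
instance (matrix_list : List (List String × String)) (word_list : List String) (out : List (List (String × Int))) : Decidable (Spec_count_words_per_direction matrix_list word_list out) := by unfold Spec_count_words_per_direction; infer_instance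

-- ===== CLAIM (what is proved, stated in full; the proofs are below) =====
def Claim_equal_count_words_per_direction : Prop := ∀ (matrix_list : List (List String × String)) (word_list : List String), Dom_count_words_per_direction matrix_list word_list → Spec_count_words_per_direction matrix_list word_list (count_words_per_direction matrix_list word_list)

-- ===== LEMMAS AND PROOFS =====

-- A's find loop from position k counts the starts i ∈ [k, len(s)] where sub is a prefix of s[i:].
theorem substrOccGo_count (s sub : List Char) :
    ∀ (n k : Nat) (c : Int), k ≤ s.length + 1 → n = s.length + 1 - k →
      substrOccGo s sub c k =
        c + ((List.range' k n).countP
              (fun i  => PySem.Chars.startswith (List.drop i s) sub) : Int) := by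
  intro n
  induction n using Nat.strong_induction_on with
  | _ n ih =>
    intro k c hk hn
    rw [substrOccGo]
    by_cases hk1 : k ≤ s.length
    · rw [PySem.Chars.findFrom_natCast s sub k hk1]
      by_cases hF : PySem.Chars.find (List.drop k s) sub = -1
      · -- no occurrence at or after k
        rw [if_pos hF]
        rw [dif_neg (by omega)]
        have hno : ∀ i, k ≤ i → ¬ sub <+: List.drop i s := by
          intro i hki hpre
          have : ∃ j, sub <+: List.drop j (List.drop k s) := ⟨i - k, by
            rw [List.drop_drop, Nat.add_sub_cancel' hki]; exact hpre⟩
          rw [PySem.Chars.exists_prefix_drop_iff_isIn, PySem.Chars.isIn_iff_infix] at this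
          exact (PySem.Chars.find_eq_neg_one_iff _ _).mp hF this
        have hz : (List.range' k n).countP
            (fun i => PySem.Chars.startswith (List.drop i s) sub) = 0 := by
          rw [List.countP_eq_zero]
          intro a ha
          have hka := (List.mem_range'_1.mp ha).1
          simp only [PySem.Chars.startswith_iff]
          exact hno a hka
        rw [hz]; simp
      · -- first occurrence at k + F
        have h0F : 0 ≤ PySem.Chars.find (List.drop k s) sub := by
          have := PySem.Chars.neg_one_le_find (List.drop k s) sub; omega
        set F := PySem.Chars.find (List.drop k s) sub with hFdef
        have hFlen : F ≤ (s.length : Int) - k := by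
          have := PySem.Chars.find_le_length (List.drop k s) sub
          rw [List.length_drop] at this; omega
        rw [if_neg hF, dif_pos (by omega)]
        have hspec := PySem.Chars.find_spec (s := List.drop k s) (sub := sub) h0F
        set Fn := F.toNat with hFn
        have htn : ((k : Int) + F + 1).toNat = k + Fn + 1 := by omega
        rw [htn]
        have hk' : k + Fn + 1 ≤ s.length + 1 := by omega
        have hn' : s.length + 1 - (k + Fn + 1) < n := by omega
        rw [ih _ hn' (k + Fn + 1) (c + 1) hk' rfl]
        -- split the position range at the found occurrence
        have hsplit : List.range' k n =
            List.range' k Fn ++ (k + Fn) :: List.range' (k + Fn + 1) (s.length + 1 - (k + Fn + 1)) := by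
          have h1 : List.range' (k + Fn) (s.length + 1 - (k + Fn + 1) + 1) =
              (k + Fn) :: List.range' (k + Fn + 1) (s.length + 1 - (k + Fn + 1)) := by
            rw [List.range'_succ]
          rw [← h1]
          have h2 := List.range'_append (s := k) (m := Fn)
            (n := s.length + 1 - (k + Fn + 1) + 1) (step := 1)
          simp only [one_mul] at h2
          rw [h2]
          congr 1
          omega
        rw [hsplit, List.countP_append, List.countP_cons]
        have hzero : (List.range' k Fn).countP
            (fun i => PySem.Chars.startswith (List.drop i s) sub) = 0 := by
          rw [List.countP_eq_zero]
          intro a ha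
          obtain ⟨ha1, ha2⟩ := List.mem_range'_1.mp ha
          simp only [PySem.Chars.startswith_iff]
          intro hpre
          have hmin := hspec.2 (a - k) (by omega)
          rw [List.drop_drop, Nat.add_sub_cancel' ha1] at hmin
          exact hmin hpre
        have hone : PySem.Chars.startswith (List.drop (k + Fn) s) sub = true := by
          rw [PySem.Chars.startswith_iff]
          have := hspec.1
          rw [List.drop_drop] at this
          exact this
        rw [hzero, if_pos hone]
        push_cast
        ring
    · -- start is past the end of the string: CPython returns -1, the loop stops
      rw [pv_findFrom_past s sub k (by omega), dif_neg (by omega)]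
      have : n = 0 := by omega
      subst this
      simp

-- A's per-row find-loop counter, as a countP over start positions
theorem substr_count (row sub : List Char) :
    substrOccGo row sub 0 0 =
      ((List.range (row.length + 1)).countP
        (fun i => PySem.Chars.startswith (List.drop i row) sub) : Int) := by
  rw [substrOccGo_count row sub (row.length + 1) 0 0 (by omega) (by omega),
    List.range_eq_range']
  ring

-- the flat list of substrings B's counter counts, per row
def subsOf (row : List Char) (lengths : List Nat) : List (List Char) :=
  (List.range (row.length + 1)).flatMap (fun i =>
    (lengths.filter (fun L => decide (i + L ≤ row.length))).map
      (fun L => (row.drop i).take L))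

-- B's nested counter loops are the insert-add-one counter of the flat substring list
theorem counter_flat (rows : List String) (lengths : List Nat) :
    alt_substring_counter rows lengths =
      (rows.flatMap (fun row => subsOf row.toList lengths)).foldl
        (fun d s => d.insert s (d.getD s 0 + 1)) PySem.Dict.empty := by
  unfold alt_substring_counter
  rw [List.foldl_flatMap]
  apply PySem.List.foldl_congr_mem
  intro acc row _
  unfold subsOf
  rw [List.foldl_flatMap]
  apply PySem.List.foldl_congr_mem
  intro acc2 i _
  rw [List.foldl_map, ← PySem.List.foldl_ite_eq_foldl_filter]

-- for one start position i: the counted substrings whose length is a word length and that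
-- equal k are exactly one when k starts at position i, and none otherwise
theorem per_start_count (row k : List Char) (lengths : List Nat)
    (hmem : k.length ∈ lengths) (hnd : lengths.Nodup) (i : Nat) (hi : i ≤ row.length) :
    ((lengths.filter (fun L => decide (i + L ≤ row.length))).map
        (fun L => (row.drop i).take L)).count k =
      if PySem.Chars.startswith (row.drop i) k then 1 else 0 := by
  rw [List.count_eq_countP, List.countP_map, List.countP_filter]
  by_cases hs : PySem.Chars.startswith (row.drop i) k = true
  · rw [if_pos hs]
    have hpre : k <+: row.drop i := (PySem.Chars.startswith_iff _ _).mp hs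
    have hklen : k.length ≤ row.length - i := by
      have := hpre.length_le
      rwa [List.length_drop] at this
    have ht : (row.drop i).take k.length = k := (List.prefix_iff_eq_take.mp hpre).symm
    have hcong : ∀ L ∈ lengths,
        (((fun x => x == k) ∘ fun L => List.take L (List.drop i row)) L
          && decide (i + L ≤ row.length)) = (L == k.length) := by
      intro L _
      simp only [Function.comp_apply]
      by_cases hL : L = k.length
      · subst hL
        have hle : i + k.length ≤ row.length := by omega
        simp [ht, hle]
      · have hR : (L == k.length) = false := by simp [hL]
        rw [hR]
        by_cases hle : i + L ≤ row.length
        · have hb : (List.take L (List.drop i row) == k) = false := by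
            simp only [beq_eq_false_iff_ne, ne_eq]
            intro hk
            apply hL
            have := congrArg List.length hk
            rw [List.length_take, List.length_drop] at this
            omega
          simp [hb]
        · simp [hle]
    rw [List.countP_congr (fun L h => by rw [hcong L h]), ← List.count_eq_countP,
      List.count_eq_one_of_mem hnd hmem]
  · rw [if_neg hs, List.countP_eq_zero]
    intro L _
    simp only [Function.comp_apply, Bool.and_eq_true, beq_iff_eq, decide_eq_true_eq, not_and]
    intro hk _
    exact absurd ((PySem.Chars.startswith_iff _ _).mpr (hk ▸ List.take_prefix L (row.drop i))) hs

-- per row: B counts k as many times as k starts somewhere in the row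
theorem subsOf_count (row k : List Char) (lengths : List Nat)
    (hmem : k.length ∈ lengths) (hnd : lengths.Nodup) :
    (subsOf row lengths).count k =
      (List.range (row.length + 1)).countP
        (fun i => PySem.Chars.startswith (row.drop i) k) := by
  unfold subsOf
  rw [List.count_flatMap]
  rw [List.map_congr_left (fun i hi => by
    exact per_start_count row k lengths hmem hnd i (by
      have := List.mem_range.mp hi; omega))]
  exact PySem.List.sum_map_ite_one_zero_nat _ _

-- B's counter lookup at k is the total number of starts of k over all rows
theorem counter_getD (rows : List String) (k : List Char) (lengths : List Nat)
    (hmem : k.length ∈ lengths) (hnd : lengths.Nodup) :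
    (alt_substring_counter rows lengths).getD k 0 =
      ((rows.map (fun row => (List.range (row.toList.length + 1)).countP
          (fun i => PySem.Chars.startswith (row.toList.drop i) k))).sum : Int) := by
  rw [counter_flat, PySem.Dict.getD_foldl_insert_add_one, PySem.Dict.getD_empty, zero_add,
    List.count_flatMap]
  have h1 : (List.map (List.count k ∘ fun row => subsOf row.toList lengths) rows) =
      rows.map (fun row => (List.range (row.toList.length + 1)).countP
        (fun i => PySem.Chars.startswith (row.toList.drop i) k)) := by
    apply List.map_congr_left
    intro row _
    simpa using subsOf_count row.toList k lengths hmem hnd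
  rw [h1, Nat.cast_list_sum, List.map_map]

-- A's row loop for one word: conditional accumulation row by row = one insert of the total.
theorem row_loop_eq (matrix : List String) (w : String) (occf : String → Int)
    (hnn : ∀ r, 0 ≤ occf r) :
    ∀ (d : PySem.Dict String Int),
      matrix.foldl (fun d r =>
        if occf r > 0 then d.insert w (d.getD w 0 + occf r) else d) d =
      (if (matrix.map occf).sum > 0 then
        d.insert w (d.getD w 0 + (matrix.map occf).sum) else d) := by
  induction matrix with
  | nil => intro d; simp
  | cons r rs ih =>
    intro d
    simp only [List.foldl_cons, List.map_cons, List.sum_cons]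
    have hS : 0 ≤ (rs.map occf).sum := List.sum_nonneg (by
      intro x hx
      obtain ⟨r', _, rfl⟩ := List.mem_map.mp hx
      exact hnn r')
    by_cases hr : occf r > 0
    · rw [if_pos hr, ih (d.insert w (d.getD w 0 + occf r))]
      rw [PySem.Dict.getD_insert_self, PySem.Dict.insert_insert_self]
      by_cases hS' : (rs.map occf).sum > 0
      · rw [if_pos hS', if_pos (by omega), add_assoc]
      · have h0 : (rs.map occf).sum = 0 := by omega
        rw [if_neg hS', h0, if_pos (by omega), add_zero]
    · have h0 : occf r = 0 := le_antisymm (by omega) (hnn r)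
      rw [if_neg hr, ih d, h0, zero_add]

-- A's whole-matrix total for a pattern k is B's counter lookup at k
theorem total_eq_counter (rows : List String) (k : List Char) (lengths : List Nat)
    (hmem : k.length ∈ lengths) (hnd : lengths.Nodup) :
    (rows.map (fun r => substrOccGo r.toList k 0 0)).sum =
      (alt_substring_counter rows lengths).getD k 0 := by
  rw [counter_getD rows k lengths hmem hnd,
    List.map_congr_left (fun r _ => substr_count r.toList k), Nat.cast_list_sum, List.map_map]
  rfl

-- the per-direction dictionaries agree
theorem dict_eq (rows : List String) (word_list : List String) (rev : Bool) :
    get_word_to_count rows word_list rev =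
      alt_direction_counts
        (alt_substring_counter rows
          (word_list.foldl (fun s word => PySem.Set.add s word.toList.length) PySem.Set.empty))
        word_list rev := by
  have hlen : word_list.foldl (fun s word => PySem.Set.add s word.toList.length) PySem.Set.empty =
      PySem.Set.ofList (word_list.map (fun w => w.toList.length)) := by
    rw [← PySem.Set.update_map_eq_foldl_add, PySem.Set.update_empty]
  set lengths := word_list.foldl (fun s word => PySem.Set.add s word.toList.length) PySem.Set.empty
    with hlengths
  have hnd : lengths.Nodup := by rw [hlen]; exact PySem.Set.nodup_ofList _
  have hmem : ∀ w ∈ word_list, w.toList.length ∈ lengths := by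
    intro w hw
    rw [hlen]
    exact (PySem.Set.mem_ofList _ _).mpr (List.mem_map_of_mem hw)
  unfold get_word_to_count alt_direction_counts
  apply PySem.List.foldl_congr_mem
  intro acc word hword
  cases rev with
  | false =>
    simp only [Bool.false_eq_true, if_false]
    have hocc : ∀ r : String, (0 : Int) + substr_occurrences r word =
        substrOccGo r.toList word.toList 0 0 := by
      intro r; rw [zero_add]; rfl
    rw [row_loop_eq rows word (fun r => 0 + substr_occurrences r word)
      (fun r => by
        show (0 : Int) ≤ 0 + substr_occurrences r word
        rw [hocc r, substr_count]; exact Int.natCast_nonneg _) acc]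
    have hmap : (rows.map (fun r => (0 : Int) + substr_occurrences r word)).sum =
        (alt_substring_counter rows lengths).getD word.toList 0 := by
      rw [List.map_congr_left (fun r _ => hocc r)]
      exact total_eq_counter rows word.toList lengths (hmem word hword) hnd
    rw [hmap]
  | true =>
    simp only [if_true]
    have hocc : ∀ r : String, (0 : Int) + substr_occurrences r
        ((PySem.Str.slice? word none none (-1)).getD word) =
        substrOccGo r.toList word.toList.reverse 0 0 := by
      intro r
      rw [zero_add, PySem.Str.slice?_none_none_neg_one, Option.getD_some]
      unfold substr_occurrences
      congr 1
      simp
    rw [row_loop_eq rows word (fun r => 0 + substr_occurrences r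
        ((PySem.Str.slice? word none none (-1)).getD word))
      (fun r => by
        show (0 : Int) ≤ 0 + substr_occurrences r ((PySem.Str.slice? word none none (-1)).getD word)
        rw [hocc r, substr_count]; exact Int.natCast_nonneg _) acc]
    have hmap : (rows.map (fun r => (0 : Int) + substr_occurrences r
        ((PySem.Str.slice? word none none (-1)).getD word))).sum =
        (alt_substring_counter rows lengths).getD word.toList.reverse 0 := by
      rw [List.map_congr_left (fun r _ => hocc r)]
      exact total_eq_counter rows word.toList.reverse lengths
        (by rw [List.length_reverse]; exact hmem word hword) hnd
    rw [hmap]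

-- the per-direction branch structures agree
theorem inner_eq (rows : List String) (word_list : List String) (dirs : List Char)
    (res : List (List (String × Int))) :
    dirs.foldl (fun word_counts direction =>
      if direction ∈ POSSIBLE_DIRECTIONS_horizontal then
        word_counts ++ [(get_word_to_count rows word_list (direction == 'u')).items]
      else if direction ∈ POSSIBLE_DIRECTIONS_vertical then
        word_counts ++ [(get_word_to_count rows word_list (direction == 'l')).items]
      else if direction ∈ POSSIBLE_DIRECTIONS_dia_top_left then
        word_counts ++ [(get_word_to_count rows word_list (direction == 'x')).items]
      else if direction ∈ POSSIBLE_DIRECTIONS_dia_bot_left then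
        word_counts ++ [(get_word_to_count rows word_list (direction == 'z')).items]
      else word_counts) res =
    dirs.foldl (fun result direction =>
      if direction ∈ BACKWARD_DIRECTIONS.toList then
        result ++ [(alt_direction_counts
          (alt_substring_counter rows
            (word_list.foldl (fun s word => PySem.Set.add s word.toList.length) PySem.Set.empty))
          word_list true).items]
      else if direction ∈ FORWARD_DIRECTIONS.toList then
        result ++ [(alt_direction_counts
          (alt_substring_counter rows
            (word_list.foldl (fun s word => PySem.Set.add s word.toList.length) PySem.Set.empty))
          word_list false).items]
      else result) res := by
  apply PySem.List.foldl_congr_mem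
  intro acc d _
  by_cases hb : d ∈ BACKWARD_DIRECTIONS.toList
  · rw [show BACKWARD_DIRECTIONS.toList = ['u', 'l', 'x', 'z'] from rfl] at hb
    fin_cases hb <;>
      simp [dict_eq, POSSIBLE_DIRECTIONS_horizontal, POSSIBLE_DIRECTIONS_vertical,
        POSSIBLE_DIRECTIONS_dia_top_left, POSSIBLE_DIRECTIONS_dia_bot_left,
        BACKWARD_DIRECTIONS]
  · by_cases hf : d ∈ FORWARD_DIRECTIONS.toList
    · rw [show FORWARD_DIRECTIONS.toList = ['d', 'r', 'w', 'y'] from rfl] at hf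
      fin_cases hf <;>
        simp [dict_eq, POSSIBLE_DIRECTIONS_horizontal, POSSIBLE_DIRECTIONS_vertical,
          POSSIBLE_DIRECTIONS_dia_top_left, POSSIBLE_DIRECTIONS_dia_bot_left,
          BACKWARD_DIRECTIONS, FORWARD_DIRECTIONS]
    · rw [show BACKWARD_DIRECTIONS.toList = ['u', 'l', 'x', 'z'] from rfl] at hb
      rw [show FORWARD_DIRECTIONS.toList = ['d', 'r', 'w', 'y'] from rfl] at hf
      simp only [List.mem_cons, List.not_mem_nil, or_false, not_or] at hb hf
      rw [if_neg (by simp [POSSIBLE_DIRECTIONS_horizontal]; exact ⟨hb.1, hf.1⟩),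
        if_neg (by simp [POSSIBLE_DIRECTIONS_vertical]; exact ⟨hb.2.1, hf.2.1⟩),
        if_neg (by simp [POSSIBLE_DIRECTIONS_dia_top_left]; exact ⟨hb.2.2.1, hf.2.2.2⟩),
        if_neg (by simp [POSSIBLE_DIRECTIONS_dia_bot_left]; exact ⟨hb.2.2.2, hf.2.2.1⟩),
        if_neg (by
          simp only [show BACKWARD_DIRECTIONS.toList = ['u', 'l', 'x', 'z'] from rfl,
            List.mem_cons, List.not_mem_nil, or_false, not_or]
          exact ⟨hb.1, hb.2.1, hb.2.2.1, hb.2.2.2⟩),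
        if_neg (by
          simp only [show FORWARD_DIRECTIONS.toList = ['d', 'r', 'w', 'y'] from rfl,
            List.mem_cons, List.not_mem_nil, or_false, not_or]
          exact ⟨hf.1, hf.2.1, hf.2.2.1, hf.2.2.2⟩)]

theorem ports_eq (matrix_list : List (List String × String)) (word_list : List String) :
    count_words_per_direction matrix_list word_list =
      count_words_per_direction_alt matrix_list word_list := by
  unfold count_words_per_direction count_words_per_direction_alt
  apply PySem.List.foldl_congr_mem
  intro acc m _
  exact inner_eq m.1 word_list m.2.toList acc

-- ===== VERDICT (by name: the statement is the Claim_ definition above) =====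
theorem count_words_per_direction_spec : Claim_equal_count_words_per_direction := by
  intro matrix_list word_list _hdom
  exact ports_eq matrix_list word_list
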